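-- pv_equiv track=rewrite | github.com/GeorgianBadita/University | Semester1/Computational Logic/tema/utils/helper.py | fromq_10
-- ===== SOURCE A (Python) =====
-- def fromq_10(number, q):
--     """
--     Functie care trece un numar dintr-o baza oarecare in baza 10 prin impartiri
--     :param number: un numar dat prin lista de cifre in baza q
--     :param q: baza in care se aflat numarul
--     :return: numarul in baza 10
--     """
--
--     base_10 = 0
--     power = 1
--     for i in range(1, number[0] + 1):
--         base_10 += number[i]*power
--         power *= q
--
--     string = []
--     while base_10:
--         string += [base_10%10]
--         base_10 //= 10
--
--     string.reverse()
--     return string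
-- ===== SOURCE B (Python) =====
-- def fromq_10(number, q):
--     value = 0
--     for i in range(number[0], 0, -1):
--         value = value * q + number[i]
--     if value == 0:
--         return []
--     return [int(c) for c in str(value)]
-- ===== Notes on version B (the rewrite author's own statement) =====
-- stated objective: idiomatic
-- what changed: Phase 1 replaces the power-accumulator sum (low digit first) by Horner's rule iterating from the most significant digit with a single accumulator, and phase 2 replaces the divide-and-reverse loop by converting the value with str() and mapping each character to int.
import Mathlib
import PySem

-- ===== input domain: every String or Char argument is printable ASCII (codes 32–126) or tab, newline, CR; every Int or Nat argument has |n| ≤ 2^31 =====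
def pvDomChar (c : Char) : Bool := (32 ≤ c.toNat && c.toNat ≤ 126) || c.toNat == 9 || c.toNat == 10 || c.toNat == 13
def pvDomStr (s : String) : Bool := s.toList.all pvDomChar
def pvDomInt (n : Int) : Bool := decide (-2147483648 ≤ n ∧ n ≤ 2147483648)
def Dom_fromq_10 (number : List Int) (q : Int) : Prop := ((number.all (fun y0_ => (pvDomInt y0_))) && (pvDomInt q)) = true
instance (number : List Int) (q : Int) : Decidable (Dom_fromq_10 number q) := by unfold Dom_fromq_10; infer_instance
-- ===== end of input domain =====

-- B: phase 1 uses Horner's rule from the most significant digit (no power accumulator);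
-- phase 2 turns the value into its decimal digit list via str() instead of a divide-and-reverse loop.


-- ===== PORT A =====
-- the 'while base_10: string += [base_10 % 10]; base_10 //= 10' loop, with fuel making it total
-- (Python's loop terminates exactly when base_10 ≥ 0, which Pre_ guarantees; fuel |b|+1 is then enough)
def pvDigitsLoopA : Nat → Int → List Int
  | 0, _ => []
  | fuel + 1, b =>
    if b ≠ 0 then PySem.Int.mod b 10 :: pvDigitsLoopA fuel (PySem.Int.floordiv b 10) else []

def fromq_10 (number : List Int) (q : Int) : List Int :=
  let st := (PySem.List.pyRange 1 (PySem.List.pyGetD number 0 0 + 1) 1).foldl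
    (fun (s : Int × Int) i => (s.1 + PySem.List.pyGetD number i 0 * s.2, s.2 * q)) (0, 1)
  (pvDigitsLoopA (st.1.natAbs + 1) st.1).reverse

-- ===== PORT B =====
def fromq_10_alt (number : List Int) (q : Int) : List Int :=
  let value := (PySem.List.pyRange (PySem.List.pyGetD number 0 0) 0 (-1)).foldl
    (fun v i => v * q + PySem.List.pyGetD number i 0) 0
  if value = 0 then []
  else (PySem.Int.toChars value).map (fun c => (PySem.Int.ofChars? [c]).getD 0)

-- ===== PRECONDITION & SPEC =====
-- Pre_ excludes exactly the inputs on which A does not return: an empty list or a digit-count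
-- header that indexes past the end of the list (A raises IndexError), and inputs whose accumulated
-- value Σ number[i+1]·q^i is negative, on which A's 'while base_10' loop never terminates
-- (base_10 //= 10 keeps a negative number negative and nonzero forever).
def Pre_fromq_10 (number : List Int) (q : Int) : Prop :=
  number ≠ [] ∧
  (number.headI ≤ 0 ∨
    (number.headI < (number.length : Int) ∧
      0 ≤ ∑ i ∈ Finset.range number.headI.toNat, number.getD (i + 1) 0 * q ^ i))
instance (number : List Int) (q : Int) : Decidable (Pre_fromq_10 number q) := by
  unfold Pre_fromq_10; infer_instance

def pvWitness_fromq_10 : List Int × Int := ([3, 2, 0, 1], 2)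

def Spec_fromq_10 (number : List Int) (q : Int) (out : List Int) : Prop := out = fromq_10_alt number q
instance (number : List Int) (q : Int) (out : List Int) : Decidable (Spec_fromq_10 number q out) := by unfold Spec_fromq_10; infer_instance

-- ===== CLAIM (what is proved, stated in full; the proofs are below) =====
def Claim_equal_fromq_10 : Prop := ∀ (number : List Int) (q : Int), Dom_fromq_10 number q → Pre_fromq_10 number q → Spec_fromq_10 number q (fromq_10 number q)

-- ===== LEMMAS AND PROOFS =====

-- the common value Σ number[a+j] * q^j (j < k), written Horner-style
def pvHorner (number : List Int) (q : Int) (a : Int) : Nat → Int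
  | 0 => 0
  | k + 1 => PySem.List.pyGetD number a 0 + q * pvHorner number q (a + 1) k

theorem pvHorner_succ_right (number : List Int) (q : Int) (a : Int) (k : Nat) :
    pvHorner number q a (k + 1) =
      pvHorner number q a k + PySem.List.pyGetD number (a + k) 0 * q ^ k := by
  induction k generalizing a with
  | zero => simp [pvHorner]
  | succ k ih =>
    rw [pvHorner, ih (a + 1), pvHorner]
    push_cast
    ring_nf

theorem pv_foldA (number : List Int) (q : Int) (k : Nat) :
    ∀ (a s p : Int),
      (PySem.List.pyRange a (a + k) 1).foldl
          (fun (s : Int × Int) i => (s.1 + PySem.List.pyGetD number i 0 * s.2, s.2 * q)) (s, p) =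
        (s + p * pvHorner number q a k, p * q ^ k) := by
  induction k with
  | zero =>
    intro a s p
    rw [PySem.List.pyRange_one_eq_nil (a := a) (b := a + ((0 : Nat) : Int)) (by push_cast; omega)]
    simp [pvHorner]
  | succ k ih =>
    intro a s p
    have hcons := PySem.List.pyRange_one_cons
      (a := a) (b := a + ((k + 1 : Nat) : Int)) (by push_cast; omega)
    rw [hcons, List.foldl_cons,
      show a + ((k + 1 : Nat) : Int) = (a + 1) + (k : Int) by push_cast; ring, ih (a + 1),
      pvHorner, Prod.mk.injEq]
    constructor <;> ring

theorem pv_foldB (number : List Int) (q : Int) (k : Nat) :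
    ∀ (a v : Int),
      (PySem.List.pyRange (a + k) a (-1)).foldl
          (fun v i => v * q + PySem.List.pyGetD number i 0) v =
        v * q ^ k + pvHorner number q (a + 1) k := by
  induction k with
  | zero =>
    intro a v
    rw [PySem.List.pyRange_neg_one_eq_nil (a := a + ((0 : Nat) : Int)) (b := a) (by push_cast; omega)]
    simp [pvHorner]
  | succ k ih =>
    intro a v
    have hcons := PySem.List.pyRange_neg_one_cons
      (a := a + ((k + 1 : Nat) : Int)) (b := a) (by push_cast; omega)
    rw [hcons, List.foldl_cons]
    rw [show a + ((k + 1 : Nat) : Int) - 1 = a + (k : Int) by push_cast; ring, ih a]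
    rw [pvHorner_succ_right]
    rw [show (a + 1) + (k : Int) = a + ((k + 1 : Nat) : Int) by push_cast; ring]
    ring

-- the Horner value as the plain polynomial sum used by Pre_
theorem pvHorner_eq_sum (number : List Int) (q : Int) (k : Nat) :
    ∀ a : Int,
      pvHorner number q a k =
        ∑ i ∈ Finset.range k, PySem.List.pyGetD number (a + i) 0 * q ^ i := by
  induction k with
  | zero => intro a; simp [pvHorner]
  | succ k ih =>
    intro a
    rw [pvHorner, ih (a + 1), Finset.sum_range_succ', Finset.mul_sum]
    push_cast
    simp only [pow_succ]
    ring_nf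

-- A's divide loop computes the little-endian decimal digit list
theorem pvDigitsLoopA_eq (m : Nat) : ∀ (fuel : Nat), m < fuel →
    pvDigitsLoopA fuel (m : Int) = (Nat.digits 10 m).map (Nat.cast) := by
  induction m using Nat.strong_induction_on with
  | h m ih =>
    intro fuel hf
    match fuel, hf with
    | f + 1, hf =>
      by_cases hm : m = 0
      · subst hm; simp [pvDigitsLoopA]
      · have h10 : ((10 : Int)) = ((10 : Nat) : Int) := by norm_num
        rw [pvDigitsLoopA, if_pos (by exact_mod_cast hm), h10,
          PySem.Int.mod_natCast, PySem.Int.floordiv_natCast,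
          ih (m / 10) (Nat.div_lt_self (Nat.pos_of_ne_zero hm) (by norm_num)) f
            (by have := Nat.div_lt_self (Nat.pos_of_ne_zero hm) (show 1 < 10 by norm_num); omega),
          Nat.digits_def' (by norm_num) (Nat.pos_of_ne_zero hm)]
        simp

-- Nat.toDigits is the reversed digitChar image of Nat.digits (for a positive number)
theorem pvToDigitsCore_eq (m : Nat) : 0 < m → ∀ (fuel : Nat) (ds : List Char), m ≤ fuel →
    Nat.toDigitsCore 10 fuel m ds = ((Nat.digits 10 m).map Nat.digitChar).reverse ++ ds := by
  induction m using Nat.strong_induction_on with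
  | h m ih =>
    intro hm fuel ds hf
    obtain ⟨f, rfl⟩ : ∃ f, fuel = f + 1 := ⟨fuel - 1, by omega⟩
    rw [Nat.toDigitsCore]
    by_cases h0 : m / 10 = 0
    · rw [if_pos h0, Nat.digits_def' (by norm_num) hm, h0]
      simp
    · rw [if_neg h0,
        ih (m / 10) (Nat.div_lt_self hm (by norm_num)) (Nat.pos_of_ne_zero h0) f
          ((m % 10).digitChar :: ds)
          (by have := Nat.div_lt_self hm (show 1 < 10 by norm_num); omega),
        Nat.digits_def' (by norm_num) hm]
      simp

theorem pvToDigits_eq (m : Nat) (hm : 0 < m) :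
    Nat.toDigits 10 m = ((Nat.digits 10 m).map Nat.digitChar).reverse := by
  rw [Nat.toDigits, pvToDigitsCore_eq m hm (m + 1) [] (by omega)]
  simp

theorem pv_ofChars_digitChar (d : Nat) (hd : d < 10) :
    (PySem.Int.ofChars? [Nat.digitChar d]).getD 0 = (d : Int) := by
  interval_cases d <;> decide

-- both ports return the reversed decimal digit list of the common value
theorem pv_phase2 (m : Nat) :
    (pvDigitsLoopA (((m : Int)).natAbs + 1) (m : Int)).reverse =
      (if (m : Int) = 0 then []
       else (PySem.Int.toChars (m : Int)).map (fun c => (PySem.Int.ofChars? [c]).getD 0)) := by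
  by_cases hm : m = 0
  · subst hm; simp [pvDigitsLoopA]
  · rw [if_neg (by exact_mod_cast hm)]
    have hmpos : 0 < m := Nat.pos_of_ne_zero hm
    rw [pvDigitsLoopA_eq m (((m : Int)).natAbs + 1) (by simp),
      PySem.Int.toChars, if_neg (by omega)]
    rw [show ((m : Int)).toNat = m by simp, pvToDigits_eq m hmpos, List.map_reverse,
      List.map_map]
    congr 1
    refine List.map_congr_left fun d hd => ?_
    simp only [Function.comp_apply]
    exact (pv_ofChars_digitChar d (Nat.digits_lt_base (by norm_num) hd)).symm

theorem pv_getD_headI (number : List Int) (h : number ≠ []) :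
    PySem.List.pyGetD number 0 0 = number.headI := by
  cases number with
  | nil => simp at h
  | cons x xs => simp [PySem.List.pyGetD_zero_cons]

-- ===== VERDICT (by name: the statement is the Claim_ definition above) =====
theorem fromq_10_spec : Claim_equal_fromq_10 := by
  intro number q _ hpre
  obtain ⟨hne, hcase⟩ := hpre
  unfold Spec_fromq_10 fromq_10 fromq_10_alt
  simp only []
  rw [pv_getD_headI number hne]
  set n : Int := number.headI with hn
  by_cases hn0 : n ≤ 0
  · -- both loops run zero times, both results are []
    rw [PySem.List.pyRange_one_eq_nil (by omega), PySem.List.pyRange_neg_one_eq_nil (by omega)]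
    simp [pvDigitsLoopA]
  · rw [not_le] at hn0
    obtain ⟨hlen, hsum⟩ := hcase.resolve_left (by omega)
    have hA := pv_foldA number q n.toNat 1 0 1
    have hB := pv_foldB number q n.toNat 0 0
    rw [show (1 : Int) + (n.toNat : Int) = n + 1 by omega] at hA
    rw [show (0 : Int) + (n.toNat : Int) = n by omega] at hB
    rw [hA, hB]
    simp only [one_mul, zero_add, zero_mul]
    -- the common value equals Pre_'s polynomial sum, hence is nonnegative
    have hterm : ∀ i ∈ Finset.range n.toNat,
        PySem.List.pyGetD number ((1 : Int) + i) 0 * q ^ i = number.getD (i + 1) 0 * q ^ i := by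
      intro i hi
      rw [Finset.mem_range] at hi
      have hilen : ((1 : Int) + i) < (number.length : Int) := by omega
      rw [PySem.List.pyGetD_eq_getElem number (i := (1 : Int) + i) 0 (by omega)
        (by exact_mod_cast hilen)]
      rw [List.getD_eq_getElem number 0 (by omega)]
      simp [show ((1 : Int) + (i : Int)).toNat = i + 1 from by omega]
    have hnonneg : 0 ≤ pvHorner number q 1 n.toNat := by
      rw [pvHorner_eq_sum, Finset.sum_congr rfl hterm]
      exact hsum
    obtain ⟨m, hm⟩ : ∃ m : Nat, pvHorner number q 1 n.toNat = (m : Int) :=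
      ⟨_, (Int.toNat_of_nonneg hnonneg).symm⟩
    rw [hm]
    exact pv_phase2 m
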